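-- pv_equiv track=rewrite | github.com/kwantlin/cs91r | thesis/iterative_auction.py | getAllFreePossibilities
-- ===== SOURCE A (Python) =====
-- def getAllFreePossibilities(bundle):
-- 	combs = []
-- 	flags = [False] * len(bundle)
-- 	while True:
-- 		a = [bundle[i] for i, flag in enumerate(flags) if flag]
-- 		b = [bundle[i] for i, flag in enumerate(flags) if not flag]
-- 		if a or b:
-- 			combs.append((a, b))
-- 		for i in range(len(bundle)):
-- 			flags[i] = not flags[i]
-- 			if flags[i]:
-- 				break
-- 		else:
-- 			break
-- 	return combs
-- ===== SOURCE B (Python) =====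
-- def getAllFreePossibilities(bundle):
--     if not bundle:
--         return []
--
--     def parts(items):
--         if not items:
--             return [([], [])]
--         x = items[0]
--         out = []
--         for a, b in parts(items[1:]):
--             out.append((a, [x] + b))
--             out.append(([x] + a, b))
--         return out
--
--     return parts(bundle)
-- ===== Notes on version B (the rewrite author's own statement) =====
-- stated objective: alternative
-- what changed: Replaces A's binary-counter enumeration (mutable flags list with a ripple-carry increment, re-scanning the bundle for each counter state) by a structural recursion on the bundle that doubles the partition list at each element, prepending the head to the b-side then the a-side of every recursive partition.
import Mathlib
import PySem

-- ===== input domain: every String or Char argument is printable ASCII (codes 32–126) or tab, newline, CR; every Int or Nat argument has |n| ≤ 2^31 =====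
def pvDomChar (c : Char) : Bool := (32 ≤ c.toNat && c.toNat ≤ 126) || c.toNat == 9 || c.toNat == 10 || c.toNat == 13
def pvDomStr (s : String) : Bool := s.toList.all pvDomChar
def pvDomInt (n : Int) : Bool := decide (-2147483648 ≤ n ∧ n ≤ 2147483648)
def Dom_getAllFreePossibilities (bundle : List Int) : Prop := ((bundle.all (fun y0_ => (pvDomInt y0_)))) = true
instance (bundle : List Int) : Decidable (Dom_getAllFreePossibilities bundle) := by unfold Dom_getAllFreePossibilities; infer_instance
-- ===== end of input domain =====

-- B replaces A's mutable flags list with its binary-increment carry loop by a structural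
-- recursion on the bundle that doubles the partition list per element (alternative; same cost).


-- ===== PORT A =====
-- the inner `for i in range(len(bundle)): flags[i] = not flags[i]; if flags[i]: break / else: break`
-- on the flags list: returns the new flags and True iff the inner loop broke (outer loop continues).
def pvInc : List Bool → List Bool × Bool
  | [] => ([], false)
  | f :: rest =>
    if !f then (true :: rest, true)
    else
      let r := pvInc rest
      (false :: r.1, r.2)

-- the two comprehensions `[bundle[i] for i, flag in enumerate(flags) if flag]` (and `if not flag`);
-- exact: enumerate yields indices 0 ≤ i < len(bundle) = len(flags), so bundle[i] = getD i 0 never defaults.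
def pvSplit (bundle : List Int) (flags : List Bool) : List Int × List Int :=
  (((flags.zipIdx).filter (fun p => p.1)).map (fun p => bundle.getD p.2 0),
   ((flags.zipIdx).filter (fun p => !p.1)).map (fun p => bundle.getD p.2 0))

-- the `while True` body; the fuel only makes the loop total (2^len(bundle) suffices, proved below).
def pvLoopA (bundle : List Int) : Nat → List Bool → List (List Int × List Int) → List (List Int × List Int)
  | 0, _, combs => combs
  | fuel+1, flags, combs =>
    let ab := pvSplit bundle flags
    let combs' := if ab.1 ≠ [] ∨ ab.2 ≠ [] then combs ++ [ab] else combs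
    let step := pvInc flags
    if step.2 then pvLoopA bundle fuel step.1 combs' else combs'

def getAllFreePossibilities (bundle : List Int) : List (List Int × List Int) :=
  pvLoopA bundle (2 ^ bundle.length) (List.replicate bundle.length false) []

-- ===== PORT B =====
-- the recursive helper `parts`: for each partition of the tail, emit (a, [x]+b) then ([x]+a, b).
def pvParts : List Int → List (List Int × List Int)
  | [] => [([], [])]
  | x :: rest =>
    (pvParts rest).flatMap (fun p => [(p.1, x :: p.2), (x :: p.1, p.2)])

-- `if not bundle: return []` then `return parts(bundle)`
def getAllFreePossibilities_alt (bundle : List Int) : List (List Int × List Int) :=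
  if bundle = [] then [] else pvParts bundle

-- ===== PRECONDITION & SPEC =====
def Spec_getAllFreePossibilities (bundle : List Int) (out : List (List Int × List Int)) : Prop := out = getAllFreePossibilities_alt bundle
instance (bundle : List Int) (out : List (List Int × List Int)) : Decidable (Spec_getAllFreePossibilities bundle out) := by unfold Spec_getAllFreePossibilities; infer_instance

-- ===== CLAIM (what is proved, stated in full; the proofs are below) =====
def Claim_equal_getAllFreePossibilities : Prop := ∀ (bundle : List Int), Dom_getAllFreePossibilities bundle → Spec_getAllFreePossibilities bundle (getAllFreePossibilities bundle)

-- ===== LEMMAS AND PROOFS =====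

-- proof-only: the pair A produces from the flag pattern of mask v
def pvPairOf (bundle : List Int) (v : Nat) : List Int × List Int :=
  (((List.range bundle.length).filter (fun i => Nat.testBit v i)).map (fun i => bundle.getD i 0),
   ((List.range bundle.length).filter (fun i => !Nat.testBit v i)).map (fun i => bundle.getD i 0))

-- flags after v increments = the bits of v, little-endian
lemma pvInc_testBit (n v : Nat) (hv : v < 2 ^ n) :
    pvInc ((List.range n).map (Nat.testBit v)) =
      ((List.range n).map (Nat.testBit (v + 1)), decide (v + 1 < 2 ^ n)) := by
  induction n generalizing v with
  | zero =>
    simp [pvInc]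
  | succ n ih =>
    simp only [List.range_succ_eq_map, List.map_cons, List.map_map]
    have hb : ∀ w : Nat, (fun i => Nat.testBit w (Nat.succ i)) = Nat.testBit (w / 2) := by
      intro w; funext i; exact Nat.testBit_succ w i
    have h2 : (2:Nat) ^ (n+1) = 2 * 2 ^ n := by ring
    by_cases hpar : v % 2 = 0
    · have h0 : Nat.testBit v 0 = false := by simp [Nat.testBit_zero]; omega
      have h0' : Nat.testBit (v+1) 0 = true := by simp [Nat.testBit_zero]; omega
      have hdiv : (v+1) / 2 = v / 2 := by omega
      have hlt : v + 1 < 2 ^ (n+1) := by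
        rw [h2]; rw [h2] at hv; omega
      simp only [Function.comp_def, hb, h0, h0', pvInc, hdiv, hlt]
      simp
    · have h0 : Nat.testBit v 0 = true := by simp [Nat.testBit_zero]; omega
      have h0' : Nat.testBit (v+1) 0 = false := by simp [Nat.testBit_zero]; omega
      have hdiv : (v+1) / 2 = v / 2 + 1 := by omega
      have hvlt : v / 2 < 2 ^ n := by rw [h2] at hv; omega
      have hiff : (v + 1 < 2 ^ (n+1)) ↔ (v / 2 + 1 < 2 ^ n) := by
        rw [h2]; omega
      simp only [Function.comp_def, hb, h0, pvInc, Bool.not_true]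
      rw [ih (v / 2) hvlt]
      simp only [hdiv, h0', hiff]
      simp

lemma pvZipIdx_range' (n s : Nat) :
    (List.range' s n).zipIdx s = (List.range' s n).map (fun i => (i, i)) := by
  induction n generalizing s with
  | zero => simp
  | succ n ih => simp only [List.range'_succ, List.zipIdx_cons, ih, List.map_cons]

lemma pvZipIdx_range (n : Nat) :
    (List.range n).zipIdx = (List.range n).map (fun i => (i, i)) := by
  rw [List.range_eq_range']; exact pvZipIdx_range' n 0

-- the a/b computed by A from the flags of mask v are pvPairOf bundle v
lemma pvSplit_eq (bundle : List Int) (v : Nat) :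
    pvSplit bundle ((List.range bundle.length).map (Nat.testBit v)) = pvPairOf bundle v := by
  unfold pvSplit pvPairOf
  rw [List.zipIdx_map, pvZipIdx_range]
  simp [List.map_map, List.filter_map, Function.comp_def]

-- on a nonempty bundle, at least one side of every pvPairOf is nonempty
lemma pvPairOf_ne (bundle : List Int) (h : bundle ≠ []) (v : Nat) :
    (pvPairOf bundle v).1 ≠ [] ∨ (pvPairOf bundle v).2 ≠ [] := by
  have h0 : 0 ∈ List.range bundle.length := by
    simp [List.length_pos_iff.mpr h]
  by_cases hb : Nat.testBit v 0
  · left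
    have : (0:Nat) ∈ (List.range bundle.length).filter (fun i => Nat.testBit v i) := by
      simp [List.mem_filter, h0, hb]
    simp only [pvPairOf, ne_eq, List.map_eq_nil_iff]
    exact fun he => by simp [he] at this
  · right
    have : (0:Nat) ∈ (List.range bundle.length).filter (fun i => !Nat.testBit v i) := by
      simp [List.mem_filter, h0, hb]
    simp only [pvPairOf, ne_eq, List.map_eq_nil_iff]
    exact fun he => by simp [he] at this

-- main loop invariant: starting from the flags of mask v, A's loop appends exactly
-- the pairs of masks v, v+1, …, 2^n - 1 (bundle nonempty so nothing is skipped)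
lemma pvLoopA_eq (bundle : List Int) (h : bundle ≠ []) (fuel v : Nat)
    (combs : List (List Int × List Int))
    (hv : v < 2 ^ bundle.length) (hf : 2 ^ bundle.length - v ≤ fuel) :
    pvLoopA bundle fuel ((List.range bundle.length).map (Nat.testBit v)) combs =
      combs ++ (List.range' v (2 ^ bundle.length - v)).map (pvPairOf bundle) := by
  induction fuel generalizing v combs with
  | zero => omega
  | succ fuel ih =>
    have hk : 2 ^ bundle.length - v = (2 ^ bundle.length - (v+1)) + 1 := by omega
    rw [hk, List.range'_succ]
    simp only [pvLoopA, pvSplit_eq, pvInc_testBit bundle.length v hv, List.map_cons]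
    have hne := pvPairOf_ne bundle h v
    by_cases hlt : v + 1 < 2 ^ bundle.length
    · simp only [hlt, decide_true, hne, if_pos]
      rw [ih (v+1) (combs ++ [pvPairOf bundle v]) hlt (by omega)]
      simp
    · have : 2 ^ bundle.length - (v+1) = 0 := by omega
      simp only [hlt, decide_false, hne, if_pos, this]
      simp

lemma pvReplicate_false (n : Nat) :
    List.replicate n false = (List.range n).map (Nat.testBit 0) := by
  symm
  rw [List.eq_replicate_iff]
  constructor
  · simp
  · intro b hb
    simp only [List.mem_map, List.mem_range] at hb
    obtain ⟨i, -, h⟩ := hb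
    simp [← h, Nat.zero_testBit]

-- range(2k) grouped in even/odd pairs
lemma pvRange_two_mul (k : Nat) :
    List.range (2 * k) = (List.range k).flatMap (fun m => [2*m, 2*m+1]) := by
  induction k with
  | zero => simp
  | succ k ih =>
    have : 2 * (k+1) = (2*k) + 1 + 1 := by ring
    rw [this, List.range_succ, List.range_succ, List.range_succ, ih]
    simp [List.flatMap_append]

lemma pvPairOf_cons_even (x : Int) (rest : List Int) (m : Nat) :
    pvPairOf (x :: rest) (2*m) = ((pvPairOf rest m).1, x :: (pvPairOf rest m).2) := by
  have h0 : Nat.testBit (2*m) 0 = false := by simp [Nat.testBit_zero]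
  have hs : ∀ i, Nat.testBit (2*m) (i+1) = Nat.testBit m i := by
    intro i; rw [Nat.testBit_succ]; congr 1; omega
  unfold pvPairOf
  simp [List.range_succ_eq_map, h0, hs, List.filter_map,
    List.map_map, Function.comp_def]

lemma pvPairOf_cons_odd (x : Int) (rest : List Int) (m : Nat) :
    pvPairOf (x :: rest) (2*m+1) = (x :: (pvPairOf rest m).1, (pvPairOf rest m).2) := by
  have h0 : Nat.testBit (2*m+1) 0 = true := by simp [Nat.testBit_zero]
  have hs : ∀ i, Nat.testBit (2*m+1) (i+1) = Nat.testBit m i := by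
    intro i; rw [Nat.testBit_succ]; congr 1; omega
  unfold pvPairOf
  simp [List.range_succ_eq_map, h0, hs, List.filter_map,
    List.map_map, Function.comp_def]

-- B's recursion produces exactly the pairs of masks 0..2^n-1
lemma pvParts_eq (bundle : List Int) :
    pvParts bundle = (List.range (2 ^ bundle.length)).map (pvPairOf bundle) := by
  induction bundle with
  | nil => simp [pvParts, pvPairOf]
  | cons x rest ih =>
    have h2 : (2:Nat) ^ (x :: rest).length = 2 * 2 ^ rest.length := by
      simp [List.length_cons]; ring
    rw [h2, pvRange_two_mul, List.map_flatMap]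
    simp only [pvParts, ih, List.flatMap_map]
    congr 1
    funext m
    simp [pvPairOf_cons_even, pvPairOf_cons_odd]

-- ===== VERDICT (by name: the statement is the Claim_ definition above) =====
theorem getAllFreePossibilities_spec : Claim_equal_getAllFreePossibilities := by
  intro bundle _
  unfold Spec_getAllFreePossibilities getAllFreePossibilities getAllFreePossibilities_alt
  by_cases h : bundle = []
  · subst h
    simp [pvLoopA, pvSplit, pvInc]
  · rw [if_neg h, pvReplicate_false,
      pvLoopA_eq bundle h (2 ^ bundle.length) 0 [] (Nat.two_pow_pos _) (Nat.sub_le _ _),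
      pvParts_eq, List.range_eq_range']
    simp
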